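-- pv_equiv track=rewrite | github.com/MiqueiasFernandes/bioinformatics | annotGenes.py | bestName
-- ===== SOURCE A (Python) =====
-- def bestName(names, pref=['['], filterPs = ['[', ']', 'protein', '_', 'PREDIC', 'PUTAT', 'putat', '.', 'hypothetic']):
--     names = list(names)
--     if len(names) < 1:
--         return ''
--     if len(names) == 1:
--         return names[0]
--     txt = ' '.join(names)
--     pScore = {p: txt.count(p) for p in set(txt.split()) if not p.isdigit() and not any([fp in p for fp in filterPs])}
--     def pontuar(name):
--         a = min([(pref.index(p) if p in name else len(pref)) for p in pref]) ### best pref < melhor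
--         b = -sum([pScore[p] if p in pScore else 0 for p in name.split()])### melhor concenso > melhor
--         c = -len(name) ### maior texto
--         return (a, b, c)
--     return sorted(names, key=pontuar)[0]
-- ===== SOURCE B (Python) =====
-- def bestName(names, pref=['['], filterPs = ['[', ']', 'protein', '_', 'PREDIC', 'PUTAT', 'putat', '.', 'hypothetic']):
--     names = list(names)
--     if len(names) < 1:
--         return ''
--     if len(names) == 1:
--         return names[0]
--     txt = ' '.join(names)
--     pScore = {w: txt.count(w)
--               for w in txt.split()
--               if not w.isdigit() and not any(fp in w for fp in filterPs)}
--
--     def critA(name):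
--         return next((i for i, p in enumerate(pref) if p in name), len(pref))
--
--     def critB(name):
--         return -sum(pScore.get(w, 0) for w in name.split())
--
--     def critC(name):
--         return -len(name)
--
--     # successive elimination: narrow the candidate list criterion by criterion,
--     # keeping original order so ties resolve like A's stable sort
--     candidates = names
--     for crit in (critA, critB, critC):
--         m = min(crit(n) for n in candidates)
--         candidates = [n for n in candidates if crit(n) == m]
--     return candidates[0]
-- ===== Notes on version B (the rewrite author's own statement) =====
-- stated objective: faster
-- what changed: B replaces A's sort-by-(pref-index, -consensus, -length)-tuple-and-take-head with successive elimination: three staged filter passes that each compute the minimum of one criterion over the surviving candidates and keep, in original order, only the candidates attaining it, returning the first survivor; the pref criterion is a first-hit enumerate scan instead of min over a list of pref.index calls, and pScore is built by a plain comprehension over txt.split().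
import Mathlib
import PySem

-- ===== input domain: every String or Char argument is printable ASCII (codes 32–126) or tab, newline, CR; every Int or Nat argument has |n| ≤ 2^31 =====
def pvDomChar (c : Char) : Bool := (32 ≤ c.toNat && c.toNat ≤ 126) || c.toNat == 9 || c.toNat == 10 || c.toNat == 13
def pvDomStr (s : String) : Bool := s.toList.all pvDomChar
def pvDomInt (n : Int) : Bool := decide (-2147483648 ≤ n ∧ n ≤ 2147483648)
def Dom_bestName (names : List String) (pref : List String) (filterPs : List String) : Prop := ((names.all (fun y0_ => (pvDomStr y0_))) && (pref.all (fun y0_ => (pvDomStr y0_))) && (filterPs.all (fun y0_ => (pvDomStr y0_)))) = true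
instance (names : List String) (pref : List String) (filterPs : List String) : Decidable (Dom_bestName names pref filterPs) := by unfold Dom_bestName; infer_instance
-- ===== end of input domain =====

-- B replaces A's sort-by-tuple-key-and-take-head with successive elimination: three staged
-- filter passes (best pref hit, then best consensus, then longest) over the candidate list,
-- returning the first survivor; objective: faster (measured).

-- ===== PORT A =====
-- eligibility filter of the dict comprehension: not p.isdigit() and not any(fp in p for fp in filterPs)
def pvElig (filterPs : List String) (p : String) : Bool :=
  !(PySem.Str.strIsdigit p) && !(filterPs.any (fun fp => PySem.Str.isIn fp p))

-- {p: txt.count(p) for p in set(txt.split()) if …}  (dict built over the set; values depend only on the key)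
def pvScoreDictA (txt : String) (filterPs : List String) : PySem.Dict String Int :=
  (PySem.Set.ofList (PySem.Str.split₀ txt)).foldl
    (fun d p => if pvElig filterPs p then d.insert p ((PySem.Str.count txt p : Nat) : Int) else d)
    PySem.Dict.empty

-- pontuar: the 3-tuple key (a, b, c); Python compares these int triples lexicographically,
-- which is sorted2's rule on the first component and '<' on Lex (Int × Int) for the (b, c) tail
def pvPontuar (pref : List String) (pScore : PySem.Dict String Int) (name : String) :
    Int × Lex (Int × Int) :=
  let a : Int := (PySem.List.min? (pref.map (fun p =>
      if PySem.Str.isIn p name then (((PySem.List.index? pref p).getD 0 : Nat) : Int)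
      else (pref.length : Int))) (fun x => x)).getD 0   -- min([...]); some under Pre_ (pref ≠ [])
  let b : Int := -(((PySem.Str.split₀ name).map (fun p =>
      if pScore.contains p then (pScore.get? p).getD 0 else 0)).sum)
  let c : Int := -(PySem.Str.len name)
  (a, toLex (b, c))

def bestName (names : List String) (pref : List String) (filterPs : List String) : String :=
  if names.length < 1 then "" else
  if names.length == 1 then (PySem.List.pyGet? names 0).getD "" else
  let txt := PySem.Str.join " " names
  let pScore := pvScoreDictA txt filterPs
  (PySem.List.pyGet? (PySem.List.sorted2 names
      (fun n => (pvPontuar pref pScore n).1) (fun n => (pvPontuar pref pScore n).2)) 0).getD ""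

-- ===== PORT B =====
-- {w: txt.count(w) for w in txt.split() if …}  (plain comprehension over the word list)
def pvScoreDictB (txt : String) (filterPs : List String) : PySem.Dict String Int :=
  (PySem.Str.split₀ txt).foldl
    (fun d p => if !(PySem.Str.strIsdigit p) && !(filterPs.any (fun fp => PySem.Str.isIn fp p))
                then d.insert p ((PySem.Str.count txt p : Nat) : Int) else d)
    PySem.Dict.empty

-- next((i for i, p in enumerate(pref) if p in name), default): first hit, else the default
def pvFirstHit (name : String) : List String → Nat → Int → Int
  | [], _, a => a
  | p :: rest, i, a => if PySem.Str.isIn p name then (i : Int) else pvFirstHit name rest (i + 1) a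

def pvCritA (pref : List String) (name : String) : Int :=
  pvFirstHit name pref 0 (pref.length : Int)

def pvCritB (pScore : PySem.Dict String Int) (name : String) : Int :=
  -(((PySem.Str.split₀ name).map (fun w => pScore.getD w 0)).sum)

def pvCritC (name : String) : Int := -(PySem.Str.len name)

-- one elimination round: m = min(crit(n) for n in cands); keep, in order, those with crit(n) == m
def pvStage (crit : String → Int) (cands : List String) : List String :=
  let m := (PySem.List.min? (cands.map crit) (fun x => x)).getD 0
  cands.filter (fun n => crit n == m)

def bestName_alt (names : List String) (pref : List String) (filterPs : List String) : String :=
  if names.length < 1 then "" else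
  if names.length == 1 then (PySem.List.pyGet? names 0).getD "" else
  let txt := PySem.Str.join " " names
  let pScore := pvScoreDictB txt filterPs
  let cands := pvStage pvCritC (pvStage (pvCritB pScore) (pvStage (pvCritA pref) names))
  (PySem.List.pyGet? cands 0).getD ""

-- ===== PRECONDITION & SPEC =====
-- Pre_ excludes only the inputs where A raises: with at least two names, 'min' of the empty
-- pref list raises ValueError; everywhere else A returns normally.
def Pre_bestName (names : List String) (pref : List String) (filterPs : List String) : Prop :=
  1 < names.length → pref ≠ []
instance (names : List String) (pref : List String) (filterPs : List String) : Decidable (Pre_bestName names pref filterPs) := by unfold Pre_bestName; infer_instance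
def pvWitness_bestName : List String × List String × List String :=
  (["abc", "ab [x]"], ["["], ["[", "]"])

def Spec_bestName (names : List String) (pref : List String) (filterPs : List String) (out : String) : Prop := out = bestName_alt names pref filterPs
instance (names : List String) (pref : List String) (filterPs : List String) (out : String) : Decidable (Spec_bestName names pref filterPs out) := by unfold Spec_bestName; infer_instance

-- ===== CLAIM (what is proved, stated in full; the proofs are below) =====
def Claim_equal_bestName : Prop := ∀ (names : List String) (pref : List String) (filterPs : List String), Dom_bestName names pref filterPs → Pre_bestName names pref filterPs → Spec_bestName names pref filterPs (bestName names pref filterPs)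

-- ===== LEMMAS AND PROOFS =====

-- get? of a conditional-insert fold whose value depends only on the key
theorem pv_foldl_insert_get? (elig : String → Bool) (v : String → Int)
    (l : List String) (d0 : PySem.Dict String Int) (k : String) :
    (l.foldl (fun d p => if elig p then d.insert p (v p) else d) d0).get? k
      = if k ∈ l ∧ elig k = true then some (v k) else d0.get? k := by
  induction l generalizing d0 with
  | nil => simp
  | cons w l ih =>
    simp only [List.foldl_cons, ih]
    by_cases hl : k ∈ l ∧ elig k = true
    · rw [if_pos hl, if_pos ⟨List.mem_cons_of_mem _ hl.1, hl.2⟩]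
    · rw [if_neg hl]
      by_cases hkw : k = w
      · subst hkw
        by_cases he : elig k = true
        · rw [if_pos he, PySem.Dict.get?_insert_self, if_pos ⟨by simp, he⟩]
        · rw [if_neg he, if_neg (by rintro ⟨_, h⟩; exact he h)]
      · have hne : ¬(k ∈ w :: l ∧ elig k = true) := by
          rintro ⟨hm, he⟩
          rcases List.mem_cons.mp hm with h | h
          · exact hkw h
          · exact hl ⟨h, he⟩
        rw [if_neg hne]
        by_cases he : elig w = true
        · rw [if_pos he, PySem.Dict.get?_insert, if_neg hkw]
        · rw [if_neg he]

-- the two score dicts agree pointwise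
theorem pv_dicts_agree (txt : String) (filterPs : List String) (k : String) :
    (pvScoreDictA txt filterPs).get? k = (pvScoreDictB txt filterPs).get? k := by
  unfold pvScoreDictA pvScoreDictB pvElig
  rw [pv_foldl_insert_get? (fun p => !(PySem.Str.strIsdigit p) && !(filterPs.any (fun fp => PySem.Str.isIn fp p))),
      pv_foldl_insert_get? (fun p => !(PySem.Str.strIsdigit p) && !(filterPs.any (fun fp => PySem.Str.isIn fp p)))]
  simp [PySem.Set.mem_ofList]

-- A's per-word score equals B's getD lookup once the dicts agree on get?
theorem pv_word_score (dA dB : PySem.Dict String Int)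
    (h : ∀ k, dA.get? k = dB.get? k) (p : String) :
    (if dA.contains p then (dA.get? p).getD 0 else 0) = dB.getD p 0 := by
  rw [PySem.Dict.contains_eq_isSome_get?, h p, PySem.Dict.getD_eq_get?_getD]
  cases dB.get? p <;> simp

-- pvFirstHit in terms of findIdx?
theorem pv_firstHit_eq (name : String) (l : List String) (i : Nat) (a : Int) :
    pvFirstHit name l i a
      = match l.findIdx? (fun p => PySem.Str.isIn p name) with
        | some j => ((i + j : Nat) : Int)
        | none => a := by
  induction l generalizing i with
  | nil => simp [pvFirstHit]
  | cons p l ih =>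
    rw [pvFirstHit, List.findIdx?_cons]
    by_cases h : PySem.Str.isIn p name = true
    · simp only [h, if_true]
      simp
    · simp only [h, if_false, Bool.false_eq_true, ih]
      cases hf : l.findIdx? (fun p => PySem.Str.isIn p name) with
      | none => simp
      | some j =>
        simp only [Option.map_some]
        push_cast
        ring

-- A's min-of-comprehension pref criterion equals B's first-hit value
theorem pv_crit_a_eq (pref : List String) (name : String) (hp : pref ≠ []) :
    (PySem.List.min? (pref.map (fun p =>
        if PySem.Str.isIn p name then (((PySem.List.index? pref p).getD 0 : Nat) : Int)
        else (pref.length : Int))) (fun x => x)).getD 0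
      = pvFirstHit name pref 0 (pref.length : Int) := by
  set f : String → Int := fun p =>
    if PySem.Str.isIn p name then (((PySem.List.index? pref p).getD 0 : Nat) : Int)
    else (pref.length : Int) with hf
  have hmapne : pref.map f ≠ [] := by simpa using hp
  obtain ⟨m, hm⟩ : ∃ m, PySem.List.min? (pref.map f) (fun x => x) = some m := by
    cases hmin : PySem.List.min? (pref.map f) (fun x => x) with
    | none => exact absurd ((PySem.List.min?_eq_none_iff _ _).mp hmin) hmapne
    | some m => exact ⟨m, rfl⟩
  have hmem := PySem.List.min?_mem hm
  have hmin := PySem.List.min?_isMin hm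
  rw [pv_firstHit_eq]
  have hfhit : ∀ p, p ∈ pref → PySem.Str.isIn p name = true →
      ∃ s : Nat, ∃ hslt : s < pref.length, PySem.Str.isIn (pref[s]'hslt) name = true ∧
        (∀ t (ht : t < s), pref[t]'(lt_trans ht hslt) ≠ p) ∧ f p = (s : Int) := by
    intro p hpm hhit
    have hsome : (PySem.List.index? pref p).isSome :=
      (PySem.List.index?_isSome_iff _ _).mpr hpm
    obtain ⟨s, hs⟩ := Option.isSome_iff_exists.mp hsome
    obtain ⟨hlt, hget, hprev⟩ := PySem.List.getElem_of_index?_eq_some hs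
    refine ⟨s, hlt, by rw [hget]; exact hhit, ?_, ?_⟩
    · intro t ht
      exact hprev t ht
    · simp only [hf]
      rw [if_pos hhit, hs]
      rfl
  cases hfi : pref.findIdx? (fun p => PySem.Str.isIn p name) with
  | none =>
    have hnone : ∀ p ∈ pref, ¬ PySem.Str.isIn p name = true := by
      intro p hpm hc
      have h2 : PySem.Str.isIn p name = false := by
        simpa using List.findIdx?_eq_none_iff.mp hfi p hpm
      rw [hc] at h2
      exact Bool.true_eq_false.mp h2
    obtain ⟨p, hpm, hpf⟩ := List.mem_map.mp hmem
    rw [hm]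
    simp only [hf] at hpf
    rw [if_neg (hnone p hpm)] at hpf
    simp [← hpf]
  | some j =>
    have hj := List.findIdx?_eq_some_iff_findIdx_eq.mp hfi
    have hjlt : j < pref.length := hj.1
    have hjidx : pref.findIdx (fun p => PySem.Str.isIn p name) = j := hj.2
    have hjhit : PySem.Str.isIn (pref[j]'hjlt) name = true := by
      have h0 : pref.findIdx (fun p => PySem.Str.isIn p name) < pref.length := by
        rw [hjidx]; exact hjlt
      have h1 := List.findIdx_getElem (p := fun p => PySem.Str.isIn p name) (xs := pref) (w := h0)
      simp only [hjidx] at h1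
      exact h1
    have hjmin : ∀ t (ht : t < pref.length), t < j → ¬ PySem.Str.isIn (pref[t]'ht) name = true := by
      intro t ht htj hc
      have h2 := List.not_of_lt_findIdx (p := fun p => PySem.Str.isIn p name) (xs := pref)
        (i := t) (by rw [hjidx]; exact htj)
      have h3 : PySem.Str.isIn (pref[t]'ht) name = false := h2
      rw [hc] at h3
      exact Bool.true_eq_false.mp h3
    have hle1 : m ≤ (j : Int) := by
      obtain ⟨s, hslt, hshit, hsprev, hsval⟩ :=
        hfhit (pref[j]'hjlt) (List.getElem_mem hjlt) hjhit
      have hsj : s ≤ j := by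
        by_contra hgt
        exact hsprev j (by omega) rfl
      have hjs : j ≤ s := by
        by_contra hlt2
        exact hjmin s hslt (by omega) hshit
      have hmle := hmin (f (pref[j]'hjlt)) (List.mem_map.mpr ⟨_, List.getElem_mem hjlt, rfl⟩)
      rw [hsval] at hmle
      have hsr : s = j := by omega
      rw [hsr] at hmle
      exact hmle
    have hle2 : (j : Int) ≤ m := by
      obtain ⟨p, hpm, hpf⟩ := List.mem_map.mp hmem
      by_cases hhit : PySem.Str.isIn p name = true
      · obtain ⟨s, hslt, hshit, _, hsval⟩ := hfhit p hpm hhit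
        have : j ≤ s := by
          by_contra hlt2
          exact hjmin s hslt (by omega) hshit
        rw [← hpf, hsval]
        exact_mod_cast this
      · simp only [hf] at hpf
        rw [if_neg hhit] at hpf
        rw [← hpf]
        exact_mod_cast Nat.le_of_lt hjlt
    rw [hm]
    simp only [Option.getD_some]
    have hcast : ((0 + j : Nat) : Int) = (j : Int) := by push_cast; ring
    rw [hcast]
    exact le_antisymm hle1 hle2

-- the key A sorts by equals the triple of B's criteria (given pref ≠ [])
theorem pv_keys_eq (pref filterPs : List String) (txt : String) (hp : pref ≠ []) (name : String) :
    pvPontuar pref (pvScoreDictA txt filterPs) name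
      = (pvCritA pref name, toLex (pvCritB (pvScoreDictB txt filterPs) name, pvCritC name)) := by
  unfold pvPontuar pvCritA pvCritB pvCritC
  rw [pv_crit_a_eq pref name hp]
  have hb : ∀ p, (if (pvScoreDictA txt filterPs).contains p
        then ((pvScoreDictA txt filterPs).get? p).getD 0 else 0)
      = (pvScoreDictB txt filterPs).getD p 0 :=
    pv_word_score _ _ (pv_dicts_agree txt filterPs)
  simp only [hb]

-- Python's '<' on the int triple (a, b, c) as a Bool, first component unrolled
def pvLexLt (k bk : Int × Lex (Int × Int)) : Bool :=
  decide (k.1 < bk.1) || (decide (k.1 = bk.1) && decide (k.2 < bk.2))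

-- sorted2's comparison equals the unrolled tuple comparison (Int first components)
theorem pv_before_eq (k1 : String → Int) (k2 : String → Lex (Int × Int)) (a b : String) :
    (decide (k1 a < k1 b) || (!decide (k1 b < k1 a) && decide (k2 a < k2 b)))
      = pvLexLt (k1 a, k2 a) (k1 b, k2 b) := by
  unfold pvLexLt
  rcases lt_trichotomy (k1 a) (k1 b) with h | h | h
  · simp [h]
  · simp [h]
  · simp [h, not_lt_of_gt h, ne_of_gt h]

-- head of insertBy into a nonempty list
theorem pv_head_insertBy {α : Type} (lt : α → α → Bool) (x b : α) (t : List α) :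
    (PySem.List.insertBy lt x (b :: t)).head? = some (if lt x b then x else b) := by
  by_cases h : lt x b <;> simp [PySem.List.insertBy, h]

-- head of the insertion-sort fold = the linear best-so-far scan
theorem pv_fold_head {κ : Type} (key : String → κ) (before : String → String → Bool)
    (ltb : κ → κ → Bool) (hbl : ∀ a b, before a b = ltb (key a) (key b)) (l : List String) :
    ∀ (b : String) (acc : List String), acc.head? = some b →
    (l.foldl (fun acc x => PySem.List.insertBy before x acc) acc).head?
      = some ((l.foldl (fun bp n => if ltb (key n) bp.2 then (n, key n) else bp) (b, key b)).1) := by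
  induction l with
  | nil => intro b acc hacc; simpa using hacc
  | cons x l ih =>
    intro b acc hacc
    obtain ⟨t, rfl⟩ : ∃ t, acc = b :: t := by
      cases acc with
      | nil => simp at hacc
      | cons y t =>
        simp only [List.head?_cons, Option.some.injEq] at hacc
        exact ⟨t, by rw [hacc]⟩
    simp only [List.foldl_cons]
    by_cases h : ltb (key x) (key b)
    · rw [ih x _ (by rw [pv_head_insertBy]; rw [hbl]; simp [h])]
      simp [h]
    · rw [ih b _ (by rw [pv_head_insertBy]; rw [hbl]; simp [h])]
      simp [h]

-- sorted2(names, k1, k2)[0] = the scan with the unrolled tuple comparison, for nonempty names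
theorem pv_sorted2_head (k1 : String → Int) (k2 : String → Lex (Int × Int))
    (n0 : String) (rest : List String) :
    (PySem.List.pyGet? (PySem.List.sorted2 (n0 :: rest) k1 k2) 0).getD ""
      = ((rest.foldl (fun bp n => if pvLexLt (k1 n, k2 n) bp.2 then (n, (k1 n, k2 n)) else bp)
            (n0, (k1 n0, k2 n0))).1) := by
  have hs : PySem.List.sorted2 (n0 :: rest) k1 k2
      = rest.foldl (fun acc x => PySem.List.insertBy
          (fun a b => decide (k1 a < k1 b) || (!decide (k1 b < k1 a) && decide (k2 a < k2 b))) x acc)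
          (PySem.List.insertBy
            (fun a b => decide (k1 a < k1 b) || (!decide (k1 b < k1 a) && decide (k2 a < k2 b))) n0 []) := by
    rfl
  have hins : PySem.List.insertBy
      (fun a b => decide (k1 a < k1 b) || (!decide (k1 b < k1 a) && decide (k2 a < k2 b))) n0 [] = [n0] := by
    simp [PySem.List.insertBy]
  rw [hs, hins]
  have hfold := pv_fold_head (fun n => (k1 n, k2 n))
    (fun a b => decide (k1 a < k1 b) || (!decide (k1 b < k1 a) && decide (k2 a < k2 b)))
    pvLexLt (fun a b => pv_before_eq k1 k2 a b) rest n0 [n0] (by simp)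
  cases hh : (rest.foldl (fun acc x => PySem.List.insertBy
      (fun a b => decide (k1 a < k1 b) || (!decide (k1 b < k1 a) && decide (k2 a < k2 b))) x acc) [n0]) with
  | nil => rw [hh] at hfold; simp at hfold
  | cons y t =>
    rw [hh] at hfold
    simp only [List.head?_cons, Option.some.injEq] at hfold
    simp [PySem.List.pyGet?, PySem.List.pyIdx?, hfold]

-- the select-first-strict-minimum recursion both sides are reduced to
def pvSelRec {κ : Type} [LinearOrder κ] (key : String → κ) : String → List String → String
  | b, [] => b
  | b, x :: t => if key x < key b then pvSelRec key x t else pvSelRec key b t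

-- pvLexLt is '<' of the Lex order
theorem pv_lexLt_eq_lt (k bk : Int × Lex (Int × Int)) :
    pvLexLt k bk = decide (toLex k < toLex bk) := by
  rcases k with ⟨a, b⟩; rcases bk with ⟨c, d⟩
  unfold pvLexLt
  by_cases h : toLex (a, b) < toLex (c, d)
  · have h' : a < c ∨ (a = c ∧ b < d) := by simpa [Prod.Lex.lt_iff] using h
    simp only [decide_eq_true h]
    rcases h' with h' | ⟨h1, h2⟩
    · simp [h']
    · simp [h1, h2]
  · have h' : ¬(a < c ∨ (a = c ∧ b < d)) := by simpa [Prod.Lex.lt_iff] using h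
    push_neg at h'
    simp only [decide_eq_false h, Bool.or_eq_false_iff]
    constructor
    · simpa using h'.1
    · by_cases h1 : a = c
      · simp [h1, h'.2 h1]
      · simp [h1]

-- the best-so-far scan = pvSelRec
theorem pv_scan_eq_selRec (k1 : String → Int) (k2 : String → Lex (Int × Int))
    (rest : List String) : ∀ (n0 : String),
    ((rest.foldl (fun bp n => if pvLexLt (k1 n, k2 n) bp.2 then (n, (k1 n, k2 n)) else bp)
        (n0, (k1 n0, k2 n0))).1)
      = pvSelRec (fun n => toLex (k1 n, k2 n)) n0 rest := by
  induction rest with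
  | nil => intro n0; simp [pvSelRec]
  | cons x t ih =>
    intro n0
    simp only [List.foldl_cons, pvSelRec]
    rw [pv_lexLt_eq_lt]
    by_cases h : toLex (k1 x, k2 x) < toLex (k1 n0, k2 n0)
    · simp only [decide_eq_true h, if_true, ih x, if_pos h]
    · simp only [decide_eq_false h, Bool.false_eq_true, if_false, ih n0, if_neg h]

-- find? respects pointwise-equal predicates on members
theorem pv_find?_congr {α : Type} (p q : α → Bool) (l : List α)
    (h : ∀ x ∈ l, p x = q x) : l.find? p = l.find? q := by
  induction l with
  | nil => rfl
  | cons x t ih =>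
    rw [List.find?_cons, List.find?_cons, h x (by simp)]
    by_cases hq : q x = true
    · simp [hq]
    · simp only [Bool.not_eq_true] at hq
      simp [hq, ih (fun y hy => h y (by simp [hy]))]

-- pvSelRec finds the FIRST element whose key is ≤ every key in the list
theorem pv_selRec_eq_find {κ : Type} [LinearOrder κ] (key : String → κ) :
    ∀ (t : List String) (b : String),
    (b :: t).find? (fun x => decide (∀ y ∈ b :: t, key x ≤ key y)) = some (pvSelRec key b t) := by
  intro t
  induction t with
  | nil =>
    intro b
    simp [pvSelRec, List.find?_cons]
  | cons x t ih =>
    intro b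
    simp only [pvSelRec]
    by_cases hxb : key x < key b
    · -- b cannot be minimal; drop it and pass to the list starting at x
      have hpb : (decide (∀ y ∈ b :: x :: t, key b ≤ key y)) = false := by
        simp only [decide_eq_false_iff_not]
        intro hall
        exact absurd (hall x (by simp)) (not_le_of_gt hxb)
      rw [List.find?_cons, hpb]
      have hcongr : ∀ z ∈ x :: t,
          (decide (∀ y ∈ b :: x :: t, key z ≤ key y))
            = (decide (∀ y ∈ x :: t, key z ≤ key y)) := by
        intro z _
        refine decide_eq_decide.mpr ?_
        constructor
        · intro hall y hy
          exact hall y (by simp [List.mem_cons] at hy ⊢; tauto)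
        · intro hall y hy
          rcases List.mem_cons.mp hy with rfl | hy'
          · exact le_of_lt (lt_of_le_of_lt (hall x (by simp)) hxb)
          · exact hall y hy'
      rw [pv_find?_congr _ _ _ hcongr, if_pos hxb, ih x]
    · -- key b ≤ key x
      have hbx : key b ≤ key x := le_of_not_gt hxb
      rw [if_neg hxb]
      by_cases hpb : ∀ y ∈ b :: x :: t, key b ≤ key y
      · -- b is minimal: both sides return b
        have hfind : (b :: x :: t).find? (fun z => decide (∀ y ∈ b :: x :: t, key z ≤ key y))
            = some b := by
          rw [List.find?_cons, decide_eq_true hpb]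
        have hpb' : ∀ y ∈ b :: t, key b ≤ key y := by
          intro y hy
          rcases List.mem_cons.mp hy with rfl | hy'
          · exact le_refl _
          · exact hpb y (by simp [hy'])
        have hsel : pvSelRec key b t = b := by
          have h := ih b
          rw [List.find?_cons, decide_eq_true hpb'] at h
          exact (Option.some.inj h).symm
        rw [hfind, hsel]
      · -- b not minimal: some strictly smaller key lives in t
        obtain ⟨w, hw, hwlt⟩ : ∃ w ∈ t, key w < key b := by
          by_contra hno
          push_neg at hno
          apply hpb
          intro y hy
          rcases List.mem_cons.mp hy with rfl | hy'
          · exact le_refl _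
          · rcases List.mem_cons.mp hy' with rfl | hy''
            · exact hbx
            · exact le_of_not_gt (by intro hlt; exact absurd hlt (not_lt_of_ge (hno y hy'')))
        have hpbF : (decide (∀ y ∈ b :: x :: t, key b ≤ key y)) = false := by
          simp only [decide_eq_false_iff_not]
          intro hall
          exact absurd (hall w (by simp [hw])) (not_le_of_gt hwlt)
        have hpxF : (decide (∀ y ∈ b :: x :: t, key x ≤ key y)) = false := by
          simp only [decide_eq_false_iff_not]
          intro hall
          exact absurd (hall w (by simp [hw]))
            (not_le_of_gt (lt_of_lt_of_le hwlt hbx))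
        have hpbF' : (decide (∀ y ∈ b :: t, key b ≤ key y)) = false := by
          simp only [decide_eq_false_iff_not]
          intro hall
          exact absurd (hall w (by simp [hw])) (not_le_of_gt hwlt)
        rw [List.find?_cons, hpbF, List.find?_cons, hpxF]
        have h := ih b
        rw [List.find?_cons, hpbF'] at h
        rw [← h]
        apply pv_find?_congr
        intro z hz
        refine decide_eq_decide.mpr ?_
        constructor
        · intro hall y hy
          rcases List.mem_cons.mp hy with rfl | hy'
          · exact hall y (by simp)
          · exact hall y (by simp [hy'])
        · intro hall y hy
          rcases List.mem_cons.mp hy with rfl | hy'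
          · exact hall y (by simp)
          · rcases List.mem_cons.mp hy' with rfl | hy''
            · exact le_trans (hall b (by simp)) hbx
            · exact hall y (by simp [hy''])

-- '≤' on the nested-Lex triple, componentwise
theorem pv_lex3_le_iff (a1 b1 c1 a2 b2 c2 : Int) :
    toLex (a1, toLex (b1, c1)) ≤ toLex (a2, toLex (b2, c2))
      ↔ a1 < a2 ∨ (a1 = a2 ∧ (b1 < b2 ∨ (b1 = b2 ∧ c1 ≤ c2))) := by
  simp [Prod.Lex.le_iff, Prod.Lex.lt_iff]

-- being minimal at every elimination stage ↔ having the lexicographically least triple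
theorem pv_tripleMin_iff (f1 f2 f3 : String → Int) (l : List String) (M1 M2 M3 : Int)
    (h1a : ∃ z ∈ l, f1 z = M1) (h1b : ∀ y ∈ l, M1 ≤ f1 y)
    (h2a : ∃ z ∈ l.filter (fun n => f1 n == M1), f2 z = M2)
    (h2b : ∀ y ∈ l.filter (fun n => f1 n == M1), M2 ≤ f2 y)
    (h3a : ∃ z ∈ (l.filter (fun n => f1 n == M1)).filter (fun n => f2 n == M2), f3 z = M3)
    (h3b : ∀ y ∈ (l.filter (fun n => f1 n == M1)).filter (fun n => f2 n == M2), M3 ≤ f3 y)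
    (x : String) (hx : x ∈ l) :
    (f1 x = M1 ∧ f2 x = M2 ∧ f3 x = M3)
      ↔ ∀ y ∈ l, toLex (f1 x, toLex (f2 x, f3 x)) ≤ toLex (f1 y, toLex (f2 y, f3 y)) := by
  constructor
  · rintro ⟨e1, e2, e3⟩ y hy
    rw [pv_lex3_le_iff]
    have h1 : f1 x ≤ f1 y := e1 ▸ h1b y hy
    by_cases hq1 : f1 x = f1 y
    · have hy1 : y ∈ l.filter (fun n => f1 n == M1) :=
        List.mem_filter.mpr ⟨hy, by simp [← hq1, e1]⟩
      have h2 : f2 x ≤ f2 y := e2 ▸ h2b y hy1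
      by_cases hq2 : f2 x = f2 y
      · have hy2 : y ∈ (l.filter (fun n => f1 n == M1)).filter (fun n => f2 n == M2) :=
          List.mem_filter.mpr ⟨hy1, by simp [← hq2, e2]⟩
        exact Or.inr ⟨hq1, Or.inr ⟨hq2, e3 ▸ h3b y hy2⟩⟩
      · exact Or.inr ⟨hq1, Or.inl (lt_of_le_of_ne h2 hq2)⟩
    · exact Or.inl (lt_of_le_of_ne h1 hq1)
  · intro hall
    obtain ⟨z1, hz1m, hz1⟩ := h1a
    have hx1le : f1 x ≤ M1 := by
      rcases (pv_lex3_le_iff _ _ _ _ _ _).mp (hall z1 hz1m) with h | ⟨h, _⟩ <;> omega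
    have e1 : f1 x = M1 := le_antisymm hx1le (h1b x hx)
    have hx1 : x ∈ l.filter (fun n => f1 n == M1) := List.mem_filter.mpr ⟨hx, by simp [e1]⟩
    obtain ⟨z2, hz2m, hz2⟩ := h2a
    have hz2l : z2 ∈ l := (List.mem_filter.mp hz2m).1
    have hz2f1 : f1 z2 = M1 := by
      have h := (List.mem_filter.mp hz2m).2; simpa using h
    have hx2le : f2 x ≤ M2 := by
      rcases (pv_lex3_le_iff _ _ _ _ _ _).mp (hall z2 hz2l) with h | ⟨h, h'⟩
      · omega
      · rcases h' with h'' | ⟨h'', _⟩ <;> omega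
    have e2 : f2 x = M2 := le_antisymm hx2le (h2b x hx1)
    have hx2 : x ∈ (l.filter (fun n => f1 n == M1)).filter (fun n => f2 n == M2) :=
      List.mem_filter.mpr ⟨hx1, by simp [e2]⟩
    obtain ⟨z3, hz3m, hz3⟩ := h3a
    have hz3l : z3 ∈ l := (List.mem_filter.mp (List.mem_filter.mp hz3m).1).1
    have hz3f1 : f1 z3 = M1 := by
      have h := (List.mem_filter.mp (List.mem_filter.mp hz3m).1).2; simpa using h
    have hz3f2 : f2 z3 = M2 := by
      have h := (List.mem_filter.mp hz3m).2; simpa using h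
    have hx3le : f3 x ≤ M3 := by
      rcases (pv_lex3_le_iff _ _ _ _ _ _).mp (hall z3 hz3l) with h | ⟨h, h'⟩
      · omega
      · rcases h' with h'' | ⟨h'', h3⟩ <;> omega
    exact ⟨e1, e2, le_antisymm hx3le (h3b x hx2)⟩

-- the attained minimum of one elimination round (nonempty candidate list)
theorem pv_stage_min (f : String → Int) (l : List String) (hl : l ≠ []) :
    (∃ z ∈ l, f z = (PySem.List.min? (l.map f) (fun x => x)).getD 0) ∧
    (∀ y ∈ l, (PySem.List.min? (l.map f) (fun x => x)).getD 0 ≤ f y) := by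
  have hmapne : l.map f ≠ [] := by simpa using hl
  obtain ⟨m, hm⟩ : ∃ m, PySem.List.min? (l.map f) (fun x => x) = some m := by
    cases hmin : PySem.List.min? (l.map f) (fun x => x) with
    | none => exact absurd ((PySem.List.min?_eq_none_iff _ _).mp hmin) hmapne
    | some m => exact ⟨m, rfl⟩
  obtain ⟨z, hzm, hzf⟩ := List.mem_map.mp (PySem.List.min?_mem hm)
  have hlow := PySem.List.min?_isMin hm
  rw [hm]
  exact ⟨⟨z, hzm, by simp [hzf]⟩, fun y hy => by
    simpa using hlow (f y) (List.mem_map.mpr ⟨y, hy, rfl⟩)⟩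

-- three elimination rounds then head = the first lex-minimal element
theorem pv_stages_head (f1 f2 f3 : String → Int) (n0 : String) (rest : List String) :
    (PySem.List.pyGet? (pvStage f3 (pvStage f2 (pvStage f1 (n0 :: rest)))) 0).getD ""
      = pvSelRec (fun n => toLex (f1 n, toLex (f2 n, f3 n))) n0 rest := by
  have hstage : ∀ (f : String → Int) (cs : List String),
      pvStage f cs
        = cs.filter (fun n => f n == (PySem.List.min? (cs.map f) (fun x => x)).getD 0) :=
    fun f cs => rfl
  rw [hstage f1, hstage f2, hstage f3]
  obtain ⟨h1a, h1b⟩ := pv_stage_min f1 (n0 :: rest) (by simp)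
  set M1 := (PySem.List.min? ((n0 :: rest).map f1) (fun x => x)).getD 0 with hM1
  have hl1ne : (n0 :: rest).filter (fun n => f1 n == M1) ≠ [] := by
    obtain ⟨z, hz, hze⟩ := h1a
    intro hc
    have hmem : z ∈ (n0 :: rest).filter (fun n => f1 n == M1) :=
      List.mem_filter.mpr ⟨hz, by simp [hze]⟩
    rw [hc] at hmem
    simp at hmem
  obtain ⟨h2a, h2b⟩ := pv_stage_min f2 _ hl1ne
  set M2 := (PySem.List.min? (((n0 :: rest).filter (fun n => f1 n == M1)).map f2)
      (fun x => x)).getD 0 with hM2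
  have hl2ne : ((n0 :: rest).filter (fun n => f1 n == M1)).filter (fun n => f2 n == M2) ≠ [] := by
    obtain ⟨z, hz, hze⟩ := h2a
    intro hc
    have hmem : z ∈ ((n0 :: rest).filter (fun n => f1 n == M1)).filter (fun n => f2 n == M2) :=
      List.mem_filter.mpr ⟨hz, by simp [hze]⟩
    rw [hc] at hmem
    simp at hmem
  obtain ⟨h3a, h3b⟩ := pv_stage_min f3 _ hl2ne
  set M3 := (PySem.List.min?
      ((((n0 :: rest).filter (fun n => f1 n == M1)).filter (fun n => f2 n == M2)).map f3)
      (fun x => x)).getD 0 with hM3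
  have hcongr : ∀ x ∈ n0 :: rest,
      (f3 x == M3 && f2 x == M2 && f1 x == M1)
        = decide (∀ y ∈ n0 :: rest,
            toLex (f1 x, toLex (f2 x, f3 x)) ≤ toLex (f1 y, toLex (f2 y, f3 y))) := by
    intro x hx
    have hiff := pv_tripleMin_iff f1 f2 f3 (n0 :: rest) M1 M2 M3 h1a h1b h2a h2b h3a h3b x hx
    by_cases hmin : ∀ y ∈ n0 :: rest,
        toLex (f1 x, toLex (f2 x, f3 x)) ≤ toLex (f1 y, toLex (f2 y, f3 y))
    · obtain ⟨e1, e2, e3⟩ := hiff.mpr hmin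
      rw [e1, e2, e3] at hmin ⊢
      simp only [decide_eq_true hmin]
      simp
    · have hne : ¬(f1 x = M1 ∧ f2 x = M2 ∧ f3 x = M3) := fun hc => hmin (hiff.mp hc)
      simp only [decide_eq_false hmin]
      by_cases e1 : f1 x = M1
      · by_cases e2 : f2 x = M2
        · by_cases e3 : f3 x = M3
          · exact absurd ⟨e1, e2, e3⟩ hne
          · simp [e3]
        · simp [e2]
      · simp [e1]
  rw [List.filter_filter, List.filter_filter, PySem.List.pyGet?_zero,
      ← List.head?_eq_getElem?, List.head?_filter,
      pv_find?_congr _ (fun x => decide (∀ y ∈ n0 :: rest,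
        toLex (f1 x, toLex (f2 x, f3 x)) ≤ toLex (f1 y, toLex (f2 y, f3 y)))) _ hcongr,
      pv_selRec_eq_find]
  simp

-- ===== VERDICT (by name: the statement is the Claim_ definition above) =====
theorem bestName_spec : Claim_equal_bestName := by
  unfold Claim_equal_bestName
  intro names pref filterPs _ hpre
  unfold Spec_bestName bestName bestName_alt
  by_cases h1 : names.length < 1
  · simp [h1]
  · by_cases h2 : names.length == 1
    · simp [h1, h2]
    · simp only [h1, h2, if_false]
      have hlen : 1 < names.length := by
        have h2' : names.length ≠ 1 := by simpa using h2
        omega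
      have hp : pref ≠ [] := hpre hlen
      obtain ⟨n0, rest, rfl⟩ : ∃ n0 rest, names = n0 :: rest := by
        cases names with
        | nil => simp at hlen
        | cons n0 rest => exact ⟨n0, rest, rfl⟩
      have hkeys := pv_keys_eq pref filterPs (PySem.Str.join " " (n0 :: rest)) hp
      have hk1 : (fun n => (pvPontuar pref
            (pvScoreDictA (PySem.Str.join " " (n0 :: rest)) filterPs) n).1)
          = fun n => pvCritA pref n := by
        funext n; rw [hkeys n]
      have hk2 : (fun n => (pvPontuar pref
            (pvScoreDictA (PySem.Str.join " " (n0 :: rest)) filterPs) n).2)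
          = fun n => toLex (pvCritB (pvScoreDictB (PySem.Str.join " " (n0 :: rest)) filterPs) n,
              pvCritC n) := by
        funext n; rw [hkeys n]
      rw [hk1, hk2, pv_sorted2_head, pv_scan_eq_selRec, pv_stages_head]
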